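-- pv_equiv track=rewrite | github.com/jmjac/advent_of_code_2020 | day_24/main.py | part2
-- ===== SOURCE A (Python) =====
-- movement = {"w": (-1, 0),
--             "e": (1, 0),
--             "S": (1, -1),
--             "W": (0, -1),
--             "E": (0, 1),
--             "N": (-1, 1)}
--
-- def part2(black_tiles):
--     for _ in range(100):
--         black_neighbours = {}
--         for tile in black_tiles:
--             x,y = tile
--             if (x,y) not in black_neighbours:
--                 black_neighbours[(x,y)] = 0
--             for m in movement.values():
--                 dx, dy = m
--                 dx = dx+x
--                 dy = dy+y
--                 if (dx, dy) not in black_neighbours: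
--                         black_neighbours[(dx, dy)] = 0
--                 black_neighbours[(dx, dy)]+=1
--         new_black = set()
--         for k,v in black_neighbours.items():
--             x,y = k
--             if v==2 and (x, y) not in black_tiles:
--                 new_black.add((x,y))
--             elif (x,y) in black_tiles:
--                 if v>0 and v<=2:
--                     new_black.add((x,y))
--         black_tiles = new_black
--     return len(black_tiles)
-- ===== SOURCE B (Python) =====
-- MOVES = [(-1, 0), (1, 0), (1, -1), (0, -1), (0, 1), (-1, 1)]
--
-- def part2(black_tiles):
--     black = set(black_tiles)
--     for _ in range(100):
--         candidates = set()
--         for (x, y) in black: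
--             candidates.add((x, y))
--             for dx, dy in MOVES:
--                 candidates.add((x + dx, y + dy))
--         new_black = set()
--         for (x, y) in candidates:
--             n = sum(1 for dx, dy in MOVES if (x + dx, y + dy) in black)
--             if (x, y) in black:
--                 if 0 < n <= 2:
--                     new_black.add((x, y))
--             elif n == 2:
--                 new_black.add((x, y))
--         black = new_black
--     return len(black)
-- ===== Notes on version B (the rewrite author's own statement) =====
-- stated objective: alternative
-- what changed: Replaces A's scatter pass (a dict of neighbour counts incremented from every black tile, then filtered) by a gather pass: build the candidate set (black tiles and their neighbours) and count each candidate's black neighbours by membership tests.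
import Mathlib
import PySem

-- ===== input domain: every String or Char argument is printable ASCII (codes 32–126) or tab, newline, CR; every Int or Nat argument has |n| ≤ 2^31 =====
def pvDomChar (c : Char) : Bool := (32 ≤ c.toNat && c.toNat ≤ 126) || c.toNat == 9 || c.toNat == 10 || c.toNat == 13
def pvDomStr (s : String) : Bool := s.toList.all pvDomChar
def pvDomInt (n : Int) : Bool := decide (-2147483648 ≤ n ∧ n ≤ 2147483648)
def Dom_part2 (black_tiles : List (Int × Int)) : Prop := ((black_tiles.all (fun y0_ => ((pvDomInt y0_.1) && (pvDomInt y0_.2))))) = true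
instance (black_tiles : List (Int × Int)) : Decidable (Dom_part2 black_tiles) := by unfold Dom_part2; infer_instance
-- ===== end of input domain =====

-- B replaces A's scatter-counting (a dict of neighbour counts incremented from every black tile, then
-- filtered) by a gather pass over a candidate set, counting each candidate's black neighbours by
-- membership tests.  Python dicts/sets are modelled by Std.HashMap/Std.HashSet (their iteration order
-- is consumed only by order-insensitive folds); A's first iteration, where the state is still the
-- input list, is peeled off so list membership and duplicate seeding stay exact.

-- ===== PORT A =====
def pvMovement : PySem.Dict String (Int × Int) :=
  PySem.Dict.ofList [("w", (-1, 0)), ("e", (1, 0)), ("S", (1, -1)), ("W", (0, -1)), ("E", (0, 1)), ("N", (-1, 1))]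

-- `if key not in d: d[key] = 0`
def pvEnsure (d : Std.HashMap (Int × Int) Int) (k : Int × Int) : Std.HashMap (Int × Int) Int :=
  if d.contains k then d else d.insert k 0

-- the ensure-then-`+= 1` on a neighbour key
def pvBump (d : Std.HashMap (Int × Int) Int) (k : Int × Int) : Std.HashMap (Int × Int) Int :=
  let d := pvEnsure d k
  d.insert k (d.getD k 0 + 1)

-- body of `for tile in black_tiles:` building black_neighbours
def pvTileA (d : Std.HashMap (Int × Int) Int) (t : Int × Int) : Std.HashMap (Int × Int) Int :=
  pvMovement.values.foldl (fun d m => pvBump d (m.1 + t.1, m.2 + t.2)) (pvEnsure d t)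

-- the `for k,v in black_neighbours.items()` filter, given the membership test on the current state
def pvNewBlackA (bn : Std.HashMap (Int × Int) Int) (isBlack : (Int × Int) → Bool) : Std.HashSet (Int × Int) :=
  bn.toList.foldl (fun nb kv =>
    if kv.2 = 2 ∧ ¬ isBlack kv.1 then nb.insert kv.1
    else if isBlack kv.1 then
      (if 0 < kv.2 ∧ kv.2 ≤ 2 then nb.insert kv.1 else nb)
    else nb) ∅

-- first iteration: black_tiles is still the input list
def pvStepA1 (black : List (Int × Int)) : Std.HashSet (Int × Int) :=
  pvNewBlackA (black.foldl pvTileA ∅) (fun k => black.contains k)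

-- later iterations: black_tiles is a set
def pvStepAS (black : Std.HashSet (Int × Int)) : Std.HashSet (Int × Int) :=
  pvNewBlackA (black.toList.foldl pvTileA ∅) (fun k => black.contains k)

def part2 (black_tiles : List (Int × Int)) : Int :=
  (((PySem.List.pyRange 1 100 1).foldl (fun b _ => pvStepAS b) (pvStepA1 black_tiles)).size : Int)

-- ===== PORT B =====
def pvMoves : List (Int × Int) := [(-1, 0), (1, 0), (1, -1), (0, -1), (0, 1), (-1, 1)]

-- candidates = black tiles plus every neighbour of a black tile
def pvCands (black : Std.HashSet (Int × Int)) : Std.HashSet (Int × Int) :=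
  black.toList.foldl (fun c t =>
    pvMoves.foldl (fun c m => c.insert (t.1 + m.1, t.2 + m.2)) (c.insert t)) ∅

-- `sum(1 for dx, dy in MOVES if (x+dx, y+dy) in black)`
def pvCount (black : Std.HashSet (Int × Int)) (c : Int × Int) : Int :=
  (pvMoves.map (fun m => if black.contains (c.1 + m.1, c.2 + m.2) then (1 : Int) else 0)).sum

-- one iteration of B's loop
def pvStepB (black : Std.HashSet (Int × Int)) : Std.HashSet (Int × Int) :=
  (pvCands black).toList.foldl (fun nb c =>
    if black.contains c then
      (if 0 < pvCount black c ∧ pvCount black c ≤ 2 then nb.insert c else nb)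
    else if pvCount black c = 2 then nb.insert c else nb) ∅

def part2_alt (black_tiles : List (Int × Int)) : Int :=
  (((PySem.List.pyRange 0 100 1).foldl (fun b _ => pvStepB b) (Std.HashSet.ofList black_tiles)).size : Int)

-- ===== PRECONDITION & SPEC =====
-- black_tiles denotes a Python set of tiles, so its element list is duplicate-free; Pre_ states that.
-- (On a duplicated list A's dict would count a duplicated tile's neighbours several times.)
def Pre_part2 (black_tiles : List (Int × Int)) : Prop := black_tiles.Nodup
instance (black_tiles : List (Int × Int)) : Decidable (Pre_part2 black_tiles) := by unfold Pre_part2; infer_instance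

def pvWitness_part2 : (List (Int × Int)) := [(0, 0), (1, 0), (1, 1)]

def Spec_part2 (black_tiles : List (Int × Int)) (out : Int) : Prop := out = part2_alt black_tiles
instance (black_tiles : List (Int × Int)) (out : Int) : Decidable (Spec_part2 black_tiles out) := by unfold Spec_part2; infer_instance

-- ===== CLAIM (what is proved, stated in full; the proofs are below) =====
def Claim_equal_part2 : Prop := ∀ (black_tiles : List (Int × Int)), Dom_part2 black_tiles → Pre_part2 black_tiles → Spec_part2 black_tiles (part2 black_tiles)

-- ===== LEMMAS AND PROOFS =====

-- number of increments key k receives while tile t is processed (proof-only)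
def pvW (k t : Int × Int) : Int :=
  (pvMoves.map (fun m => if k = (m.1 + t.1, m.2 + t.2) then (1 : Int) else 0)).sum

-- dict value at k after A has processed the tiles of l (proof-only)
def pvCnt (k : Int × Int) (l : List (Int × Int)) : Int := (l.map (pvW k)).sum

-- count of k's black neighbours, by membership in the list l (proof-only)
def pvCountL (l : List (Int × Int)) (c : Int × Int) : Int :=
  (pvMoves.map (fun m => if (c.1 + m.1, c.2 + m.2) ∈ l then (1 : Int) else 0)).sum

-- the semantic next-generation predicate, relative to the tile list l
def pvNextP (l : List (Int × Int)) (x : Int × Int) : Prop :=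
  (x ∈ l ∨ ∃ t ∈ l, ∃ m ∈ pvMoves, x = (m.1 + t.1, m.2 + t.2)) ∧
    ((pvCnt x l = 2 ∧ x ∉ l) ∨ (x ∈ l ∧ 0 < pvCnt x l ∧ pvCnt x l ≤ 2))

theorem pv_values_eq : pvMovement.values = pvMoves := by decide

theorem pv_moves_nodup : pvMoves.Nodup := by decide

theorem pv_ensure_getD (d : Std.HashMap (Int × Int) Int) (k j : Int × Int) :
    (pvEnsure d k).getD j 0 = d.getD j 0 := by
  unfold pvEnsure
  split_ifs with h
  · rfl
  · rw [Std.HashMap.getD_insert]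
    split_ifs with hj
    · simp only [beq_iff_eq] at hj
      subst hj
      rw [Std.HashMap.getD_eq_fallback_of_contains_eq_false (by simpa using h)]
    · rfl

theorem pv_ensure_contains (d : Std.HashMap (Int × Int) Int) (k j : Int × Int) :
    (pvEnsure d k).contains j = (k == j || d.contains j) := by
  unfold pvEnsure
  split_ifs with h
  · by_cases hj : k = j
    · subst hj; simp [h]
    · simp [hj]
  · rw [Std.HashMap.contains_insert]

theorem pv_bump_getD (d : Std.HashMap (Int × Int) Int) (k j : Int × Int) :
    (pvBump d k).getD j 0 = d.getD j 0 + (if j = k then 1 else 0) := by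
  unfold pvBump
  simp only
  rw [Std.HashMap.getD_insert]
  by_cases hj : j = k
  · subst hj; simp [pv_ensure_getD]
  · rw [if_neg (by simpa using (Ne.symm hj)), if_neg hj, pv_ensure_getD, add_zero]

theorem pv_bump_contains (d : Std.HashMap (Int × Int) Int) (k j : Int × Int) :
    (pvBump d k).contains j = (k == j || d.contains j) := by
  unfold pvBump
  simp only
  rw [Std.HashMap.contains_insert, pv_ensure_contains]
  by_cases hj : k = j <;> simp [hj]

theorem pv_foldBump_getD (t j : Int × Int) : ∀ (ms : List (Int × Int)) (d : Std.HashMap (Int × Int) Int),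
    (ms.foldl (fun d m => pvBump d (m.1 + t.1, m.2 + t.2)) d).getD j 0
      = d.getD j 0 + (ms.map (fun m => if j = (m.1 + t.1, m.2 + t.2) then (1 : Int) else 0)).sum
  | [], d => by simp
  | m :: ms, d => by
      rw [List.foldl_cons, pv_foldBump_getD t j ms, pv_bump_getD]
      simp [add_assoc]

theorem pv_foldBump_contains (t j : Int × Int) : ∀ (ms : List (Int × Int)) (d : Std.HashMap (Int × Int) Int),
    (ms.foldl (fun d m => pvBump d (m.1 + t.1, m.2 + t.2)) d).contains j = true
      ↔ (∃ m ∈ ms, j = (m.1 + t.1, m.2 + t.2)) ∨ d.contains j = true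
  | [], d => by simp
  | m :: ms, d => by
      rw [List.foldl_cons, pv_foldBump_contains t j ms, pv_bump_contains]
      simp only [List.mem_cons, Bool.or_eq_true, beq_iff_eq]
      constructor
      · rintro (h | h) <;> aesop
      · rintro (⟨m', hm' | hm', rfl⟩ | h) <;> aesop

theorem pv_tileA_getD (d : Std.HashMap (Int × Int) Int) (t j : Int × Int) :
    (pvTileA d t).getD j 0 = d.getD j 0 + pvW j t := by
  unfold pvTileA pvW
  rw [pv_values_eq, pv_foldBump_getD, pv_ensure_getD]

theorem pv_tileA_contains (d : Std.HashMap (Int × Int) Int) (t j : Int × Int) :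
    (pvTileA d t).contains j = true
      ↔ j = t ∨ (∃ m ∈ pvMoves, j = (m.1 + t.1, m.2 + t.2)) ∨ d.contains j = true := by
  unfold pvTileA
  rw [pv_values_eq, pv_foldBump_contains, pv_ensure_contains]
  simp only [Bool.or_eq_true, beq_iff_eq]
  constructor
  · rintro (h | h | h) <;> aesop
  · rintro (h | h | h) <;> aesop

theorem pv_build_getD (j : Int × Int) : ∀ (l : List (Int × Int)) (d : Std.HashMap (Int × Int) Int),
    (l.foldl pvTileA d).getD j 0 = d.getD j 0 + pvCnt j l
  | [], d => by simp [pvCnt]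
  | t :: l, d => by
      rw [List.foldl_cons, pv_build_getD j l, pv_tileA_getD]
      simp [pvCnt, add_assoc]

theorem pv_build_contains (j : Int × Int) : ∀ (l : List (Int × Int)) (d : Std.HashMap (Int × Int) Int),
    (l.foldl pvTileA d).contains j = true
      ↔ j ∈ l ∨ (∃ t ∈ l, ∃ m ∈ pvMoves, j = (m.1 + t.1, m.2 + t.2)) ∨ d.contains j = true
  | [], d => by simp
  | t :: l, d => by
      rw [List.foldl_cons, pv_build_contains j l, pv_tileA_contains]
      simp only [List.mem_cons]
      constructor
      · rintro (h | ⟨t', ht', hm⟩ | (h | h | h))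
        · exact Or.inl (Or.inr h)
        · exact Or.inr (Or.inl ⟨t', Or.inr ht', hm⟩)
        · exact Or.inl (Or.inl h)
        · exact Or.inr (Or.inl ⟨t, Or.inl rfl, h⟩)
        · exact Or.inr (Or.inr h)
      · rintro ((h | h) | ⟨t', ht' | ht', hm⟩ | h)
        · exact Or.inr (Or.inr (Or.inl h))
        · exact Or.inl h
        · subst ht'; exact Or.inr (Or.inr (Or.inr (Or.inl hm)))
        · exact Or.inr (Or.inl ⟨t', ht', hm⟩)
        · exact Or.inr (Or.inr (Or.inr (Or.inr h)))

theorem pv_mem_cands_aux (x : Int × Int) : ∀ (l : List (Int × Int)) (c : Std.HashSet (Int × Int)),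
    x ∈ l.foldl (fun c t =>
        pvMoves.foldl (fun c m => c.insert (t.1 + m.1, t.2 + m.2)) (c.insert t)) c
      ↔ x ∈ c ∨ x ∈ l ∨ ∃ t ∈ l, ∃ m ∈ pvMoves, x = (t.1 + m.1, t.2 + m.2)
  | [], c => by simp
  | t :: l, c => by
      rw [List.foldl_cons, pv_mem_cands_aux x l]
      have hmem : ∀ (s : Std.HashSet (Int × Int)),
          x ∈ pvMoves.foldl (fun c m => c.insert (t.1 + m.1, t.2 + m.2)) s
            ↔ x ∈ s ∨ ∃ m ∈ pvMoves, x = (t.1 + m.1, t.2 + m.2) := by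
        intro s
        induction pvMoves generalizing s with
        | nil => simp
        | cons m ms ih =>
            rw [List.foldl_cons, ih]
            simp only [Std.HashSet.mem_insert, beq_iff_eq, List.mem_cons]
            constructor
            · rintro ((h | h) | h) <;> aesop
            · rintro (h | ⟨m', hm' | hm', rfl⟩) <;> aesop
      rw [hmem]
      simp only [Std.HashSet.mem_insert, beq_iff_eq, List.mem_cons]
      constructor
      · rintro ((h | h) | h | h) <;> aesop
      · rintro (h | (h | h) | ⟨t', ht' | ht', hm⟩) <;> aesop

theorem pv_mem_cands (x : Int × Int) (black : Std.HashSet (Int × Int)) :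
    x ∈ pvCands black ↔ x ∈ black.toList ∨ ∃ t ∈ black.toList, ∃ m ∈ pvMoves, x = (t.1 + m.1, t.2 + m.2) := by
  unfold pvCands
  rw [pv_mem_cands_aux]
  simp

theorem pv_sum_ind_mem (x : Int × Int) : ∀ (ms : List (Int × Int)), ms.Nodup →
    (ms.map (fun m => if x = m then (1 : Int) else 0)).sum = if x ∈ ms then 1 else 0
  | [], _ => by simp
  | m :: ms, h => by
      rw [List.map_cons, List.sum_cons, pv_sum_ind_mem x ms (List.nodup_cons.mp h).2]
      by_cases hx : x = m
      · subst hx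
        simp [(List.nodup_cons.mp h).1]
      · simp [hx, List.mem_cons]

theorem pv_flip (k t : Int × Int) :
    (pvMoves.map (fun m => if (k.1 + m.1, k.2 + m.2) = t then (1 : Int) else 0)).sum = pvW k t := by
  unfold pvW
  rw [List.map_congr_left (l := pvMoves)
        (f := fun m => if (k.1 + m.1, k.2 + m.2) = t then (1 : Int) else 0)
        (g := fun m => if ((t.1 - k.1, t.2 - k.2) : Int × Int) = m then (1 : Int) else 0)
        (fun m _ => by
          apply if_congr _ rfl rfl
          simp only [Prod.ext_iff]
          omega),
      List.map_congr_left (l := pvMoves)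
        (f := fun m => if k = ((m.1 + t.1, m.2 + t.2) : Int × Int) then (1 : Int) else 0)
        (g := fun m => if ((k.1 - t.1, k.2 - t.2) : Int × Int) = m then (1 : Int) else 0)
        (fun m _ => by
          apply if_congr _ rfl rfl
          simp only [Prod.ext_iff]
          omega),
      pv_sum_ind_mem _ _ pv_moves_nodup, pv_sum_ind_mem _ _ pv_moves_nodup]
  apply if_congr _ rfl rfl
  simp only [pvMoves, List.mem_cons, Prod.mk.injEq, List.not_mem_nil, or_false]
  omega

theorem pv_cnt_eq_countL (k : Int × Int) : ∀ (l : List (Int × Int)), l.Nodup →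
    pvCnt k l = pvCountL l k
  | [], _ => by simp [pvCnt, pvCountL, pvMoves]
  | t :: l, h => by
      unfold pvCountL
      have hfun : ∀ m ∈ pvMoves,
          (if ((k.1 + m.1, k.2 + m.2) : Int × Int) ∈ t :: l then (1 : Int) else 0)
            = (if ((k.1 + m.1, k.2 + m.2) : Int × Int) = t then (1 : Int) else 0)
              + (if ((k.1 + m.1, k.2 + m.2) : Int × Int) ∈ l then (1 : Int) else 0) := by
        intro m _
        by_cases hx : ((k.1 + m.1, k.2 + m.2) : Int × Int) = t
        · rw [if_pos (by simp [hx]), if_pos hx,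
              if_neg (by rw [hx]; exact (List.nodup_cons.mp h).1), add_zero]
        · rw [if_neg hx, zero_add]
          apply if_congr _ rfl rfl
          simp [List.mem_cons, hx]
      rw [List.map_congr_left hfun, PySem.List.sum_map_add_int, pv_flip,
          show (List.map (fun a => if ((k.1 + a.1, k.2 + a.2) : Int × Int) ∈ l then (1 : Int) else 0) pvMoves).sum
              = pvCountL l k from rfl,
          ← pv_cnt_eq_countL k l (List.nodup_cons.mp h).2]
      simp [pvCnt]

-- counts depend only on membership
theorem pv_countL_congr (k : Int × Int) (l₁ l₂ : List (Int × Int)) (hm : ∀ y, y ∈ l₁ ↔ y ∈ l₂) :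
    pvCountL l₁ k = pvCountL l₂ k := by
  unfold pvCountL
  exact congrArg List.sum (List.map_congr_left (fun m _ => by
    apply if_congr (hm _) rfl rfl))

theorem pv_toList_nodup {α : Type} [BEq α] [LawfulBEq α] [Hashable α] [LawfulHashable α]
    (s : Std.HashSet α) : s.toList.Nodup :=
  (Std.HashSet.distinct_toList (m := s)).imp (fun h => by simpa using h)

-- membership in a conditional-insert fold
theorem pv_mem_foldl_insert_if {α β : Type} [BEq α] [LawfulBEq α] [Hashable α]
    (f : β → α) (Q : β → Prop) [DecidablePred Q] (x : α) :
    ∀ (l : List β) (s : Std.HashSet α),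
    (x ∈ l.foldl (fun nb c => if Q c then nb.insert (f c) else nb) s
      ↔ x ∈ s ∨ ∃ c ∈ l, Q c ∧ f c = x)
  | [], s => by simp
  | c :: l, s => by
      rw [List.foldl_cons, pv_mem_foldl_insert_if f Q x l]
      by_cases hq : Q c
      · rw [if_pos hq]
        simp only [Std.HashSet.mem_insert, beq_iff_eq, List.mem_cons]
        constructor
        · rintro ((h | h) | h) <;> aesop
        · rintro (h | ⟨c', hc' | hc', hq', hf⟩) <;> aesop
      · rw [if_neg hq]
        constructor
        · rintro (h | h) <;> aesop
        · rintro (h | ⟨c', hc' | hc', hq', hf⟩) <;> aesop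

-- membership in A's filtered set, in terms of contains/getD
theorem pv_mem_newBlackA (bn : Std.HashMap (Int × Int) Int) (isBlack : (Int × Int) → Bool) (x : Int × Int) :
    x ∈ pvNewBlackA bn isBlack
      ↔ bn.contains x = true ∧
        ((bn.getD x 0 = 2 ∧ ¬ isBlack x) ∨ (isBlack x ∧ 0 < bn.getD x 0 ∧ bn.getD x 0 ≤ 2)) := by
  unfold pvNewBlackA
  have hbody : (fun (nb : Std.HashSet (Int × Int)) (kv : (Int × Int) × Int) =>
      if kv.2 = 2 ∧ ¬ isBlack kv.1 then nb.insert kv.1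
      else if isBlack kv.1 then
        (if 0 < kv.2 ∧ kv.2 ≤ 2 then nb.insert kv.1 else nb)
      else nb)
      = fun nb kv =>
        if (kv.2 = 2 ∧ ¬ isBlack kv.1) ∨ (isBlack kv.1 ∧ 0 < kv.2 ∧ kv.2 ≤ 2) then nb.insert kv.1 else nb := by
    funext nb kv
    split_ifs <;> tauto
  rw [hbody, pv_mem_foldl_insert_if (f := Prod.fst)
        (Q := fun kv => (kv.2 = 2 ∧ ¬ isBlack kv.1) ∨ (isBlack kv.1 ∧ 0 < kv.2 ∧ kv.2 ≤ 2))]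
  simp only [Std.HashSet.not_mem_empty, false_or]
  constructor
  · rintro ⟨⟨k, v⟩, hkv, hq, rfl⟩
    have hv : bn[k]? = some v := Std.HashMap.mem_toList_iff_getElem?_eq_some.mp hkv
    have hmem : k ∈ bn := by rw [← Std.HashMap.isSome_getElem?_iff_mem, hv]; rfl
    have : v = bn.getD k 0 := by
      have := Std.HashMap.getElem?_eq_some_getD (fallback := 0) hmem
      rw [hv] at this
      exact Option.some_injective _ this
    subst this
    exact ⟨Std.HashMap.contains_iff_mem.mpr hmem, hq⟩
  · rintro ⟨hc, hq⟩
    have hmem : x ∈ bn := Std.HashMap.contains_iff_mem.mp hc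
    exact ⟨(x, bn.getD x 0),
      Std.HashMap.mem_toList_iff_getElem?_eq_some.mpr (Std.HashMap.getElem?_eq_some_getD hmem), hq, rfl⟩

-- neighbour offsets can be written on either side of the addition
theorem pv_nbr_comm (L : List (Int × Int)) (x : Int × Int) :
    (∃ t ∈ L, ∃ m ∈ pvMoves, x = (t.1 + m.1, t.2 + m.2))
      ↔ (∃ t ∈ L, ∃ m ∈ pvMoves, x = (m.1 + t.1, m.2 + t.2)) := by
  constructor
  · rintro ⟨t, ht, m, hm, h⟩
    exact ⟨t, ht, m, hm, by rw [h, add_comm t.1, add_comm t.2]⟩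
  · rintro ⟨t, ht, m, hm, h⟩
    exact ⟨t, ht, m, hm, by rw [h, add_comm m.1, add_comm m.2]⟩

theorem pv_stepA1_mem (l : List (Int × Int)) (x : Int × Int) :
    x ∈ pvStepA1 l ↔ pvNextP l x := by
  unfold pvStepA1 pvNextP
  rw [pv_mem_newBlackA]
  have hc : ((l.foldl pvTileA ∅).contains x = true)
      ↔ (x ∈ l ∨ ∃ t ∈ l, ∃ m ∈ pvMoves, x = (m.1 + t.1, m.2 + t.2)) := by
    rw [pv_build_contains]
    simp
  have hg : (l.foldl pvTileA ∅).getD x 0 = pvCnt x l := by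
    rw [pv_build_getD]
    simp
  rw [hc, hg]
  simp only [List.contains_iff_mem]

theorem pv_stepAS_mem (S : Std.HashSet (Int × Int)) (x : Int × Int) :
    x ∈ pvStepAS S ↔ pvNextP S.toList x := by
  unfold pvStepAS pvNextP
  rw [pv_mem_newBlackA]
  have hc : ((S.toList.foldl pvTileA ∅).contains x = true)
      ↔ (x ∈ S.toList ∨ ∃ t ∈ S.toList, ∃ m ∈ pvMoves, x = (m.1 + t.1, m.2 + t.2)) := by
    rw [pv_build_contains]
    simp
  have hg : (S.toList.foldl pvTileA ∅).getD x 0 = pvCnt x S.toList := by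
    rw [pv_build_getD]
    simp
  have hb : (S.contains x = true) ↔ x ∈ S.toList := by
    rw [Std.HashSet.mem_toList, ← Std.HashSet.contains_iff_mem]
  rw [hc, hg]
  constructor
  · rintro ⟨h1, h2⟩
    refine ⟨h1, ?_⟩
    rcases h2 with ⟨h3, h4⟩ | ⟨h3, h4⟩
    · exact Or.inl ⟨h3, fun hx => h4 (by simpa [hb] using hx)⟩
    · exact Or.inr ⟨hb.mp (by simpa using h3), h4⟩
  · rintro ⟨h1, h2⟩
    refine ⟨h1, ?_⟩
    rcases h2 with ⟨h3, h4⟩ | ⟨h3, h4⟩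
    · exact Or.inl ⟨h3, fun hx => h4 (hb.mp (by simpa using hx))⟩
    · exact Or.inr ⟨by simpa [hb] using h3, h4⟩

theorem pv_count_eq_countL (T : Std.HashSet (Int × Int)) (x : Int × Int) :
    pvCount T x = pvCountL T.toList x := by
  unfold pvCount pvCountL
  exact congrArg List.sum (List.map_congr_left (fun m _ => by
    apply if_congr _ rfl rfl
    rw [Std.HashSet.mem_toList, ← Std.HashSet.contains_iff_mem]))

theorem pv_stepB_mem (T : Std.HashSet (Int × Int)) (x : Int × Int) :
    x ∈ pvStepB T ↔ pvNextP T.toList x := by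
  unfold pvStepB pvNextP
  have hbody : (fun (nb : Std.HashSet (Int × Int)) (c : Int × Int) =>
      if T.contains c then
        (if 0 < pvCount T c ∧ pvCount T c ≤ 2 then nb.insert c else nb)
      else if pvCount T c = 2 then nb.insert c else nb)
      = fun nb c =>
        if (T.contains c ∧ 0 < pvCount T c ∧ pvCount T c ≤ 2) ∨ (¬ T.contains c ∧ pvCount T c = 2)
        then nb.insert c else nb := by
    funext nb c
    split_ifs <;> tauto
  rw [hbody, pv_mem_foldl_insert_if (f := fun c => c)
        (Q := fun c => (T.contains c ∧ 0 < pvCount T c ∧ pvCount T c ≤ 2) ∨ (¬ T.contains c ∧ pvCount T c = 2))]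
  simp only [Std.HashSet.not_mem_empty, false_or]
  have hb : ∀ y, (T.contains y = true) ↔ y ∈ T.toList := by
    intro y
    rw [Std.HashSet.mem_toList, ← Std.HashSet.contains_iff_mem]
  have hcnt : pvCount T x = pvCnt x T.toList := by
    rw [pv_count_eq_countL, pv_cnt_eq_countL x T.toList (pv_toList_nodup T)]
  constructor
  · rintro ⟨c, hcmem, hq, rfl⟩
    have hcand := (pv_mem_cands c T).mp (Std.HashSet.mem_toList.mp hcmem)
    refine ⟨by rw [← pv_nbr_comm]; exact hcand, ?_⟩
    rw [← hcnt]
    rcases hq with ⟨h1, h2⟩ | ⟨h1, h2⟩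
    · exact Or.inr ⟨(hb c).mp h1, h2⟩
    · exact Or.inl ⟨h2, fun hx => h1 ((hb c).mpr hx)⟩
  · rintro ⟨h1, h2⟩
    refine ⟨x, Std.HashSet.mem_toList.mpr ((pv_mem_cands x T).mpr (by rw [pv_nbr_comm]; exact h1)), ?_, rfl⟩
    rw [← hcnt] at h2
    rcases h2 with ⟨h3, h4⟩ | ⟨h3, h4⟩
    · exact Or.inr ⟨fun hx => h4 ((hb x).mp hx), h3⟩
    · exact Or.inl ⟨(hb x).mpr h3, h4⟩

theorem pv_nextP_congr (x : Int × Int) (l₁ l₂ : List (Int × Int)) (h₁ : l₁.Nodup) (h₂ : l₂.Nodup)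
    (hm : ∀ y, y ∈ l₁ ↔ y ∈ l₂) : pvNextP l₁ x ↔ pvNextP l₂ x := by
  unfold pvNextP
  have hc : pvCnt x l₁ = pvCnt x l₂ := by
    rw [pv_cnt_eq_countL x l₁ h₁, pv_cnt_eq_countL x l₂ h₂]
    exact pv_countL_congr x l₁ l₂ hm
  have he : (∃ t ∈ l₁, ∃ m ∈ pvMoves, x = (m.1 + t.1, m.2 + t.2))
      ↔ (∃ t ∈ l₂, ∃ m ∈ pvMoves, x = (m.1 + t.1, m.2 + t.2)) := by
    constructor
    · rintro ⟨t, ht, hrest⟩; exact ⟨t, (hm t).mp ht, hrest⟩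
    · rintro ⟨t, ht, hrest⟩; exact ⟨t, (hm t).mpr ht, hrest⟩
  rw [hc, he, hm x]

theorem pv_iter (x : Int × Int) : ∀ (r : List Int) (S T : Std.HashSet (Int × Int)),
    (∀ y, y ∈ S ↔ y ∈ T) →
    (x ∈ r.foldl (fun b _ => pvStepAS b) S ↔ x ∈ r.foldl (fun b _ => pvStepB b) T)
  | [], S, T, hm => hm x
  | _ :: r, S, T, hm => by
      rw [List.foldl_cons, List.foldl_cons]
      exact pv_iter x r (pvStepAS S) (pvStepB T) (fun y =>
        (pv_stepAS_mem S y).trans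
          ((pv_nextP_congr y S.toList T.toList (pv_toList_nodup S) (pv_toList_nodup T)
              (fun z => Std.HashSet.mem_toList.trans ((hm z).trans Std.HashSet.mem_toList.symm))).trans
            (pv_stepB_mem T y).symm))

theorem pv_size_congr (S T : Std.HashSet (Int × Int)) (h : ∀ x, x ∈ S ↔ x ∈ T) : S.size = T.size := by
  rw [← Std.HashSet.length_toList, ← Std.HashSet.length_toList]
  exact List.Perm.length_eq ((List.perm_ext_iff_of_nodup (pv_toList_nodup S) (pv_toList_nodup T)).mpr
    (fun z => Std.HashSet.mem_toList.trans ((h z).trans Std.HashSet.mem_toList.symm)))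

-- ===== VERDICT (by name: the statement is the Claim_ definition above) =====
theorem part2_spec : Claim_equal_part2 := by
  intro bt _ hpre
  unfold Spec_part2 part2 part2_alt
  rw [show PySem.List.pyRange 0 100 1 = 0 :: PySem.List.pyRange 1 100 1 from
        PySem.List.pyRange_one_cons (by norm_num), List.foldl_cons]
  have hstart : ∀ y, y ∈ pvStepA1 bt ↔ y ∈ pvStepB (Std.HashSet.ofList bt) := by
    intro y
    refine (pv_stepA1_mem bt y).trans (Iff.trans ?_ (pv_stepB_mem _ y).symm)
    refine pv_nextP_congr y bt _ hpre (pv_toList_nodup _) (fun z => ?_)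
    rw [Std.HashSet.mem_toList, Std.HashSet.mem_ofList, List.contains_iff_mem]
  exact congrArg Int.ofNat (pv_size_congr _ _ (fun x =>
    pv_iter x (PySem.List.pyRange 1 100 1) (pvStepA1 bt) (pvStepB (Std.HashSet.ofList bt)) hstart))
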